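-- pv_equiv track=rewrite | github.com/Chaudhary-CS/ApplyTune | backend/services/resume_optimizer.py | _optimize_skills
-- ===== SOURCE A (Python) =====
-- from typing import Dict, List
--
-- def _optimize_skills(current_skills: List[str],
--                     job_analysis: Dict) -> List[str]:
--     """
--     Reorder and enhance skills section to prioritize job-relevant skills.
--     Put the most relevant skills first - that's what ATS looks at!
--     """
--     job_keywords = job_analysis.get('keywords', {})
--     job_tech_skills = set(s.lower() for s in job_keywords.get('technical_skills', []))
--     job_soft_skills = set(s.lower() for s in job_keywords.get('soft_skills', []))
--
--     # Categorize existing skills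
--     matched_skills = []
--     other_skills = []
--
--     for skill in current_skills:
--         skill_lower = skill.lower()
--         if skill_lower in job_tech_skills or skill_lower in job_soft_skills:
--             matched_skills.append(skill)
--         else:
--             other_skills.append(skill)
--
--     # Add job skills that aren't in resume yet (if relevant)
--     # Only add skills that might be implied by their experience
--     skills_to_consider = list(job_tech_skills)[:10]  # Top 10 job skills
--
--     for skill in skills_to_consider:
--         # Check if skill is already listed (case-insensitive)
--         if not any(skill.lower() == s.lower() for s in current_skills):
--             # TODO: In a real version, we'd check if they actually have this skill
--             # For now, we'll suggest it but not add automatically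
--             pass
--
--     # Combine: matched skills first, then others
--     optimized_skills = matched_skills + other_skills
--
--     return optimized_skills
-- ===== SOURCE B (Python) =====
-- from typing import Dict, List
--
-- def _optimize_skills(current_skills: List[str],
--                     job_analysis: Dict) -> List[str]:
--     """Stable sort: job-relevant skills first, original order kept within each group."""
--     kw = job_analysis.get('keywords', {})
--     job_skills = {s.lower() for s in kw.get('technical_skills', [])} | \
--                  {s.lower() for s in kw.get('soft_skills', [])}
--     return sorted(current_skills, key=lambda s: 0 if s.lower() in job_skills else 1)
-- ===== Notes on version B (the rewrite author's own statement) =====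
-- stated objective: simpler
-- what changed: Replaces the explicit two-accumulator partition loop (and drops the effect-free skills_to_consider loop) with one stable sort keyed 0/1 on membership in the union of the job's tech and soft skill sets.
import Mathlib
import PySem

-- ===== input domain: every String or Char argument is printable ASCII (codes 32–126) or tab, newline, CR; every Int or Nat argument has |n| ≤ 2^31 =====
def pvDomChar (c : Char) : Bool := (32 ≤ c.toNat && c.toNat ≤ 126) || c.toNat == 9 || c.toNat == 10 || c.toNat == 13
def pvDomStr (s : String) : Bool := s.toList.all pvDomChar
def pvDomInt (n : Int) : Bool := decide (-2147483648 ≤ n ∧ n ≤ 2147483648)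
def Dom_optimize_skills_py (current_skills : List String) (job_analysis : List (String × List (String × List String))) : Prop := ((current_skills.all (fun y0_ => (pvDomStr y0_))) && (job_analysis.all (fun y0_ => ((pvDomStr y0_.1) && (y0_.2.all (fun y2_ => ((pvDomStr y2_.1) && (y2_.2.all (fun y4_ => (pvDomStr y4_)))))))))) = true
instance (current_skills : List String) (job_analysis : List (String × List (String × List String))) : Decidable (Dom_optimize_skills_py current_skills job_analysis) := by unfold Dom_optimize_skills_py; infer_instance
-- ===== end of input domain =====

-- B replaces A's two-accumulator partition loop (and the effect-free skills_to_consider loop)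
-- with a single stable sort keyed 0/1 on membership in the union of the job skill sets: simpler.


-- ===== PORT A =====
def optimize_skills_py (current_skills : List String) (job_analysis : List (String × List (String × List String))) : List String :=
  let job_keywords := PySem.Dict.getD (PySem.Dict.mk job_analysis) "keywords" []
  let job_tech_skills : PySem.Set String :=
    PySem.Set.ofList ((PySem.Dict.getD (PySem.Dict.mk job_keywords) "technical_skills" []).map PySem.Str.lower)
  let job_soft_skills : PySem.Set String :=
    PySem.Set.ofList ((PySem.Dict.getD (PySem.Dict.mk job_keywords) "soft_skills" []).map PySem.Str.lower)
  let p := current_skills.foldl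
    (fun (acc : List String × List String) skill =>
      let skill_lower := PySem.Str.lower skill
      if skill_lower ∈ job_tech_skills ∨ skill_lower ∈ job_soft_skills then
        (acc.1 ++ [skill], acc.2)
      else
        (acc.1, acc.2 ++ [skill]))
    ([], [])
  -- the Python 'skills_to_consider' loop only executes 'pass': it has no effect and no port
  p.1 ++ p.2

-- ===== PORT B =====
def optimize_skills_py_alt (current_skills : List String) (job_analysis : List (String × List (String × List String))) : List String :=
  let kw := PySem.Dict.getD (PySem.Dict.mk job_analysis) "keywords" []
  let job_skills : PySem.Set String :=
    PySem.Set.union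
      (PySem.Set.ofList ((PySem.Dict.getD (PySem.Dict.mk kw) "technical_skills" []).map PySem.Str.lower))
      (PySem.Set.ofList ((PySem.Dict.getD (PySem.Dict.mk kw) "soft_skills" []).map PySem.Str.lower))
  PySem.List.sorted current_skills
    (fun s => if PySem.Str.lower s ∈ job_skills then (0 : Int) else 1) false

-- ===== PRECONDITION & SPEC =====
def Spec_optimize_skills_py (current_skills : List String) (job_analysis : List (String × List (String × List String))) (out : List String) : Prop := out = optimize_skills_py_alt current_skills job_analysis
instance (current_skills : List String) (job_analysis : List (String × List (String × List String))) (out : List String) : Decidable (Spec_optimize_skills_py current_skills job_analysis out) := by unfold Spec_optimize_skills_py; infer_instance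

-- ===== CLAIM (what is proved, stated in full; the proofs are below) =====
def Claim_equal_optimize_skills_py : Prop := ∀ (current_skills : List String) (job_analysis : List (String × List (String × List String))), Dom_optimize_skills_py current_skills job_analysis → Spec_optimize_skills_py current_skills job_analysis (optimize_skills_py current_skills job_analysis)

-- ===== LEMMAS AND PROOFS =====

-- inserting a 0-key element into (zeros ++ ones) puts it right between the groups
lemma insertBy_zero_mid {α : Type} (key : α → Int) (x : α) (M O : List α)
    (hx : key x = 0) (hM : ∀ m ∈ M, key m = 0) (hO : ∀ o ∈ O, key o = 1) :
    PySem.List.insertBy (fun a b => decide (key a < key b)) x (M ++ O)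
      = M ++ x :: O := by
  induction M with
  | nil =>
    cases O with
    | nil => simp [PySem.List.insertBy]
    | cons o os =>
      have ho : key o = 1 := hO o (by simp)
      simp [PySem.List.insertBy, hx, ho]
  | cons m ms ih =>
    have hm : key m = 0 := hM m (by simp)
    have hrec := ih (fun a ha => hM a (by simp [ha]))
    simp [List.cons_append, PySem.List.insertBy, hx, hm, hrec]

-- inserting a 1-key element appends it at the end
lemma insertBy_one_end {α : Type} (key : α → Int) (x : α) (L : List α)
    (hx : key x = 1) (hL : ∀ y ∈ L, key y ≤ 1) :
    PySem.List.insertBy (fun a b => decide (key a < key b)) x L = L ++ [x] := by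
  apply PySem.List.insertBy_of_forall_not_before
  intro y hy
  have := hL y hy
  simp [hx]
  omega

-- the stable insertion sort with a 0/1-valued key is exactly "zeros first, then ones"
lemma sorted01_eq_partition {α : Type} (key : α → Int)
    (hk : ∀ x, key x = 0 ∨ key x = 1) (xs : List α) :
    PySem.List.sorted xs key false
      = xs.filter (fun x => key x = 0) ++ xs.filter (fun x => key x = 1) := by
  rw [PySem.List.sorted_eq_foldl_insertBy]
  suffices h : ∀ (l M O : List α), (∀ m ∈ M, key m = 0) → (∀ o ∈ O, key o = 1) →
      l.foldl (fun acc x => PySem.List.insertBy (fun a b => decide (key a < key b)) x acc) (M ++ O)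
        = (M ++ l.filter (fun x => key x = 0)) ++ (O ++ l.filter (fun x => key x = 1)) by
    have := h xs [] [] (by simp) (by simp)
    simpa using this
  intro l
  induction l with
  | nil => intro M O hM hO; simp
  | cons x t ih =>
    intro M O hM hO
    rcases hk x with hx | hx
    · simp only [List.foldl_cons]
      rw [insertBy_zero_mid key x M O hx hM hO]
      have : M ++ x :: O = (M ++ [x]) ++ O := by simp
      rw [this, ih (M ++ [x]) O
        (by intro m hm; rcases List.mem_append.mp hm with h | h
            · exact hM m h
            · simp at h; simpa [h] using hx) hO]
      have hx1 : ¬ (key x = 1) := by omega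
      simp [hx]
    · simp only [List.foldl_cons]
      rw [insertBy_one_end key x (M ++ O) hx]
      · have : (M ++ O) ++ [x] = M ++ (O ++ [x]) := by simp
        rw [this, ih M (O ++ [x]) hM
          (by intro o ho; rcases List.mem_append.mp ho with h | h
              · exact hO o h
              · simp at h; simpa [h] using hx)]
        have hx0 : ¬ (key x = 0) := by omega
        simp [hx]
      · intro y hy
        rcases List.mem_append.mp hy with h | h
        · have := hM y h; omega
        · have := hO y h; omega

-- A's partition loop produces the two filters
lemma partition_foldl {α : Type} (p : α → Prop) [DecidablePred p] (xs : List α) (m o : List α) :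
    xs.foldl (fun (acc : List α × List α) x =>
        if p x then (acc.1 ++ [x], acc.2) else (acc.1, acc.2 ++ [x])) (m, o)
      = (m ++ xs.filter (fun x => decide (p x)), o ++ xs.filter (fun x => !decide (p x))) := by
  induction xs generalizing m o with
  | nil => simp
  | cons x t ih =>
    by_cases hx : p x <;> simp [List.foldl_cons, hx, ih]

-- ===== VERDICT (by name: the statement is the Claim_ definition above) =====
theorem optimize_skills_py_spec : Claim_equal_optimize_skills_py := by
  intro cs ja _
  unfold Spec_optimize_skills_py optimize_skills_py optimize_skills_py_alt
  dsimp only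
  set kw := PySem.Dict.getD (PySem.Dict.mk ja) "keywords" [] with hkw
  set T : PySem.Set String :=
    PySem.Set.ofList ((PySem.Dict.getD (PySem.Dict.mk kw) "technical_skills" []).map PySem.Str.lower) with hT
  set S : PySem.Set String :=
    PySem.Set.ofList ((PySem.Dict.getD (PySem.Dict.mk kw) "soft_skills" []).map PySem.Str.lower) with hS
  set key : String → Int :=
    fun s => if PySem.Str.lower s ∈ PySem.Set.union T S then (0 : Int) else 1 with hkey
  have hk : ∀ s, key s = 0 ∨ key s = 1 := by
    intro s; simp only [hkey]
    by_cases h : PySem.Str.lower s ∈ PySem.Set.union T S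
    · left; rw [if_pos h]
    · right; rw [if_neg h]
  rw [sorted01_eq_partition key hk cs]
  rw [partition_foldl (fun skill => PySem.Str.lower skill ∈ T ∨ PySem.Str.lower skill ∈ S) cs [] []]
  simp only [List.nil_append]
  have hpred : ∀ s : String,
      (PySem.Str.lower s ∈ T ∨ PySem.Str.lower s ∈ S) ↔ key s = 0 := by
    intro s
    rw [← PySem.Set.mem_union]
    simp only [hkey]
    by_cases h : PySem.Str.lower s ∈ PySem.Set.union T S
    · rw [if_pos h]; exact iff_of_true h rfl
    · rw [if_neg h]; exact iff_of_false h (by omega)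
  congr 1
  · apply List.filter_congr
    intro s _
    by_cases h : key s = 0
    · simp [h, (hpred s).mpr h]
    · have : ¬ (PySem.Str.lower s ∈ T ∨ PySem.Str.lower s ∈ S) := fun hc => h ((hpred s).mp hc)
      simp [h, this]
  · apply List.filter_congr
    intro s _
    rcases hk s with h | h
    · simp [h, (hpred s).mpr h]
    · have h0 : ¬ key s = 0 := by omega
      have : ¬ (PySem.Str.lower s ∈ T ∨ PySem.Str.lower s ∈ S) := fun hc => h0 ((hpred s).mp hc)
      simp [h, this]
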